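-- pv_equiv track=rewrite | github.com/bjarnie22/Hopur_12_VNL1 | RU_Basement_Open/error.py | NotIcelandicNumberError
-- ===== SOURCE A (Python) =====
-- def NotIcelandicNumberError(number):
--     if number == "":
--         return True
--     elif len(number) == 7:
--         for digit in number:
--             if digit.isnumeric() == False:
--                 return "Please use a valid phone number with digits fx (6667887 or 666-7887)"
--         return True
--     elif len(number) == 8:
--         if number[3] != "-":
--             return "Please input a valid phone number fx (6667887 or 666-7887)"
--         else:
--             for number in number[0:3]:
--                 if number.isnumeric() == False:
--                     return "Please use a valid phone number with digits fx (6667887 or 666-7887)"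
--             for number in number[4:]:
--                 if number.isnumeric() == False:
--                     return "Please use a valid phone number with digits fx (6667887 or 666-7887)"
--         return True
--     else:
--         return "Please put in an Icelandic number"
-- ===== SOURCE B (Python) =====
-- def NotIcelandicNumberError(number):
--     if number == "":
--         return True
--     # canonical shape: digit -> 'd', dash stays '-', anything else -> 'x';
--     # a valid number is exactly one whose shape is 'ddddddd' or 'ddd-dddd'
--     shape = "".join("d" if ch.isnumeric() else ch if ch == "-" else "x" for ch in number)
--     if shape == "ddddddd" or shape == "ddd-dddd":
--         return True
--     if len(number) not in (7, 8):
--         return "Please put in an Icelandic number"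
--     if len(number) == 8 and number[3] != "-":
--         return "Please input a valid phone number fx (6667887 or 666-7887)"
--     return "Please use a valid phone number with digits fx (6667887 or 666-7887)"
-- ===== Notes on version B (the rewrite author's own statement) =====
-- stated objective: alternative
-- what changed: B canonicalizes the input once into a shape string (digit->'d', '-' kept, other->'x'), accepts iff the shape equals 'ddddddd' or 'ddd-dddd', and only then classifies the failure by length/dash — replacing A's length if/elif chain with per-character early-return scanning loops.
-- outside the precondition, e.g. on NotIcelandicNumberError(''): A returns True, B returns True; on NotIcelandicNumberError('1234567'): A returns True, B returns True
import Mathlib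
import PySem

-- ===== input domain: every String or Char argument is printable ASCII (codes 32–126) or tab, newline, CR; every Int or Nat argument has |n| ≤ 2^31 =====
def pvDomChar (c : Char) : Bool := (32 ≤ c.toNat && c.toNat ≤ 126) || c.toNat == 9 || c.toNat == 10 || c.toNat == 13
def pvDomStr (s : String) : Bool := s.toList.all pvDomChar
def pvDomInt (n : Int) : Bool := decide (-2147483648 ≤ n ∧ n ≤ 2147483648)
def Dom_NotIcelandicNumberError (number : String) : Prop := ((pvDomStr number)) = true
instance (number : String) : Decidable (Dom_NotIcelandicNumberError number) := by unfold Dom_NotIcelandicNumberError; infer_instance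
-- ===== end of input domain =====

-- B canonicalizes the input once into a shape string compared against the two valid patterns,
-- instead of A's length if/elif chain of per-character scanning loops (alternative, same cost).


def pvMsgUse : String := "Please use a valid phone number with digits fx (6667887 or 666-7887)"
def pvMsgInput : String := "Please input a valid phone number fx (6667887 or 666-7887)"
def pvMsgIce : String := "Please put in an Icelandic number"
-- .isnumeric(): exact on the ASCII domain, where it holds exactly on '0'..'9'
def pvIsNum (c : Char) : Bool := decide ('0' ≤ c ∧ c ≤ '9')

-- ===== PORT A =====
-- A's for-loop "if digit.isnumeric() == False: return <msgUse>"; none = loop fell through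
def pvLoopA : List Char → Option String
  | [] => none
  | c :: rest => if pvIsNum c = false then some pvMsgUse else pvLoopA rest

-- Where Python's A returns the boolean True (not a str), outside Pre_, the port returns "True".
def NotIcelandicNumberError (number : String) : String :=
  let l := number.toList
  if l = [] then "True"
  else if l.length = 7 then
    match pvLoopA l with
    | some m => m
    | none => "True"
  else if l.length = 8 then
    if PySem.List.pyGet? l 3 ≠ some '-' then pvMsgInput
    else
      let first3 := PySem.List.slice l (some 0) (some 3)
      match pvLoopA first3 with
      | some m => m
      | none =>
        -- A's first loop rebound the variable 'number' to its last element (a 1-char string),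
        -- so the second loop runs over that 1-char string's slice [4:], which is empty
        let rebound : List Char := match first3.getLast? with
          | some c => [c]
          | none => l
        match pvLoopA (PySem.List.slice rebound (some 4) none) with
        | some m => m
        | none => "True"
  else pvMsgIce

-- ===== PORT B =====
def pvShapeChar (c : Char) : Char :=
  if pvIsNum c then 'd' else if c = '-' then '-' else 'x'

def NotIcelandicNumberError_alt (number : String) : String :=
  let l := number.toList
  if l = [] then "True"
  else
    let shape := l.map pvShapeChar
    if shape = "ddddddd".toList ∨ shape = "ddd-dddd".toList then "True"
    else if ¬(l.length = 7 ∨ l.length = 8) then pvMsgIce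
    else if l.length = 8 ∧ PySem.List.pyGet? l 3 ≠ some '-' then pvMsgInput
    else pvMsgUse

-- ===== PRECONDITION & SPEC =====
-- Pre_ excludes exactly the inputs on which the Python A returns the boolean True, which is not a
-- value of the declared str return type (so A has no string value there to match): the empty
-- string, all-digit length-7 strings, and length-8 strings with '-' at index 3 whose first three
-- characters are digits — the last group includes the loop-variable-rebinding cases where A never
-- checks the final four characters; B returns True on the genuinely valid ones and the digits
-- message on those unchecked-suffix cases.
def Pre_NotIcelandicNumberError (number : String) : Prop :=
  ¬(number.toList = [] ∨
    (number.toList.length = 7 ∧ number.toList.all pvIsNum = true) ∨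
    (number.toList.length = 8 ∧ number.toList[3]? = some '-' ∧
      (number.toList.take 3).all pvIsNum = true))
instance (number : String) : Decidable (Pre_NotIcelandicNumberError number) := by
  unfold Pre_NotIcelandicNumberError; infer_instance

def pvWitness_NotIcelandicNumberError : String := "123x4567"

def Spec_NotIcelandicNumberError (number : String) (out : String) : Prop := out = NotIcelandicNumberError_alt number
instance (number : String) (out : String) : Decidable (Spec_NotIcelandicNumberError number out) := by unfold Spec_NotIcelandicNumberError; infer_instance

-- ===== CLAIM (what is proved, stated in full; the proofs are below) =====
def Claim_equal_NotIcelandicNumberError : Prop := ∀ (number : String), Dom_NotIcelandicNumberError number → Pre_NotIcelandicNumberError number → Spec_NotIcelandicNumberError number (NotIcelandicNumberError number)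

-- ===== LEMMAS AND PROOFS =====

-- A's scanning loop either falls through (all digits) or returns the one message
theorem pvLoopA_eq (l : List Char) :
    pvLoopA l = if l.all pvIsNum then none else some pvMsgUse := by
  induction l with
  | nil => simp [pvLoopA]
  | cons c rest ih =>
    by_cases h : pvIsNum c
    · simp [pvLoopA, h, ih]
    · simp [pvLoopA, h]

theorem pvShapeChar_d {c : Char} (h : pvShapeChar c = 'd') : pvIsNum c = true := by
  unfold pvShapeChar at h
  split_ifs at h with h1 h2
  · exact h1
  · exact absurd h (by decide)
  · exact absurd h (by decide)

theorem pvShapeChar_dash {c : Char} (h : pvShapeChar c = '-') : c = '-' := by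
  unfold pvShapeChar at h
  split_ifs at h with h1 h2
  · exact absurd h (by decide)
  · exact h2
  · exact absurd h (by decide)

-- a list whose shape is all 'd' is all digits
theorem all_num_of_map_replicate {l : List Char} {n : ℕ}
    (h : l.map pvShapeChar = List.replicate n 'd') : l.all pvIsNum = true := by
  rw [List.all_eq_true]
  intro c hc
  have : pvShapeChar c ∈ List.replicate n 'd' := h ▸ List.mem_map_of_mem hc
  exact pvShapeChar_d (List.eq_of_mem_replicate this)

-- ===== VERDICT (by name: the statement is the Claim_ definition above) =====
theorem NotIcelandicNumberError_spec : Claim_equal_NotIcelandicNumberError := by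
  intro number _ hpre
  unfold Spec_NotIcelandicNumberError NotIcelandicNumberError NotIcelandicNumberError_alt
  unfold Pre_NotIcelandicNumberError at hpre
  push Not at hpre
  obtain ⟨hne, h7, h8⟩ := hpre
  set l := number.toList with hl
  have hdd7 : (['d','d','d','d','d','d','d'] : List Char) = List.replicate 7 'd' := by decide
  simp only [hne, if_false]
  by_cases hlen7 : l.length = 7
  · -- length 7: Pre_ says not all digits, both return pvMsgUse
    have hnot : l.all pvIsNum = false := by simpa using h7 hlen7
    have hs1 : ¬ l.map pvShapeChar = (['d','d','d','d','d','d','d'] : List Char) := by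
      intro h
      rw [hdd7] at h
      exact absurd (all_num_of_map_replicate h) (by simp [hnot])
    have hs2 : ¬ l.map pvShapeChar = (['d','d','d','-','d','d','d','d'] : List Char) := by
      intro h
      have := congrArg List.length h
      simp [hlen7] at this
    simp [hlen7, pvLoopA_eq, hnot, hs1, hs2]
  · by_cases hlen8 : l.length = 8
    · -- length 8
      have h3lt : (3 : Nat) < l.length := by omega
      have hs1 : ¬ l.map pvShapeChar = (['d','d','d','d','d','d','d'] : List Char) := by
        intro h
        have := congrArg List.length h
        simp [hlen8] at this
      by_cases hdash : l[3] = '-'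
      · -- dash present: Pre_ says the first three are not all digits
        have htake : (l.take 3).all pvIsNum = false := by
          simpa using h8 hlen8 (by simp [List.getElem?_eq_getElem h3lt, hdash])
        have hs2 : ¬ l.map pvShapeChar = (['d','d','d','-','d','d','d','d'] : List Char) := by
          intro h
          have ht : (l.take 3).map pvShapeChar = List.replicate 3 'd' := by
            have := congrArg (List.take 3) h
            simpa [List.map_take] using this
          exact absurd (all_num_of_map_replicate ht) (by simp [htake])
        have hslice0 : PySem.List.slice l (some 0) (some 3) = l.take 3 := by
          simpa using PySem.List.slice_to_natCast l 3
        simp [hlen8, hs1, hs2, hdash, hslice0, pvLoopA_eq, htake,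
              PySem.List.pyGet?, PySem.List.pyIdx?]
      · -- no dash at index 3: both return pvMsgInput
        have hs2 : ¬ l.map pvShapeChar = (['d','d','d','-','d','d','d','d'] : List Char) := by
          intro h
          have h3 : ((l.map pvShapeChar)[3]? : Option Char) = some '-' := by
            rw [h]; decide
          rw [List.getElem?_map] at h3
          rw [List.getElem?_eq_getElem h3lt] at h3
          simp at h3
          exact hdash (pvShapeChar_dash h3)
        simp [hlen8, hs1, hs2, hdash, PySem.List.pyGet?, PySem.List.pyIdx?]
    · -- other lengths: both return pvMsgIce
      have hs1 : ¬ l.map pvShapeChar = (['d','d','d','d','d','d','d'] : List Char) := by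
        intro h
        have := congrArg List.length h
        simp at this; omega
      have hs2 : ¬ l.map pvShapeChar = (['d','d','d','-','d','d','d','d'] : List Char) := by
        intro h
        have := congrArg List.length h
        simp at this; omega
      simp [hlen7, hlen8, hs1, hs2]
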